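-- pv_equiv track=rewrite | github.com/pypa/pipenv | pipenv/operations/install.py | _format_pip_output
-- ===== SOURCE A (Python) =====
-- def _format_pip_output(out, r=None):
--     def gen(out):
--         for line in out.split('\n'):
--             # Remove requirements file information from pip9 output.
--             if '(from -r' in line:
--                 yield line[: line.index('(from -r')]
--
--             else:
--                 yield line
--
--     out = '\n'.join([l for l in gen(out)])
--     return out
-- ===== SOURCE B (Python) =====
-- import re
--
-- def _format_pip_output(out, r=None):
--     # One pattern-directed pass over the whole text: delete each "(from -r"
--     # marker together with the rest of its line ([^\n]* cannot cross lines).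
--     return re.sub(r'\(from -r[^\n]*', '', out)
-- ===== Notes on version B (the rewrite author's own statement) =====
-- stated objective: idiomatic
-- what changed: Replaces the split-into-lines loop with its membership test and index truncation per line by a single stdlib regex substitution over the whole text that deletes each requirements-file marker together with the remainder of its line.
import Mathlib
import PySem

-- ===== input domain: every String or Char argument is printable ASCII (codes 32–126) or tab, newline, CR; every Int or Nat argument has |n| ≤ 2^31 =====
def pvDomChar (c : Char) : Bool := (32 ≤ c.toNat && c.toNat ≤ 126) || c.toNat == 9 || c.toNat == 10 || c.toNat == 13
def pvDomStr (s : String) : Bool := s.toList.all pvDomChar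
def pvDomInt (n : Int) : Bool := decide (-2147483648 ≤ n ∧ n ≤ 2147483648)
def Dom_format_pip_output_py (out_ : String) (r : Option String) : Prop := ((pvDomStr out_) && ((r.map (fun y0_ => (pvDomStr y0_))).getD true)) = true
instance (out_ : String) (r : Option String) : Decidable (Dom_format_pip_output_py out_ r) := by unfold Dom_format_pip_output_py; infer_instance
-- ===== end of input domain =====

-- B replaces A's split-into-lines loop with one regex-style left-to-right scan
-- (re.sub(r'\(from -r[^\n]*', '', out)); idiomatic, return value only (A mutates nothing).

-- ===== PORT A =====
-- the marker string '(from -r'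
def pvPat : List Char := "(from -r".toList

-- body of A's generator 'gen' for one line
def pvGenLine (line : List Char) : List Char :=
  if PySem.Chars.isIn pvPat line then
    PySem.Chars.slice line none (some (PySem.Chars.find line pvPat))
  else line

def format_pip_output_py (out_ : String) (r : Option String) : String :=
  String.ofList
    (PySem.Chars.join ['\n'] ((PySem.Chars.splitOn out_.toList ['\n']).map pvGenLine))

-- ===== PORT B =====
-- Hand port of re.sub(r'\(from -r[^\n]*', '', out): scan left to right; at a match
-- the engine consumes the marker and the rest of the line ([^\n]*) and resumes at the
-- '\n' (the matched first char '(' is ≠ '\n', so resuming is dropWhile (· ≠ '\n') cs).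
-- Exact for this pattern: it has no anchors/backtracking and cannot cross a newline.
def pvSub : List Char → List Char
  | [] => []
  | c :: cs =>
    if pvPat.isPrefixOf (c :: cs) then pvSub (cs.dropWhile (· ≠ '\n'))
    else c :: pvSub cs
termination_by l => l.length
decreasing_by
  · exact Nat.lt_succ_of_le (List.length_dropWhile_le _ _)
  · simp

def format_pip_output_py_alt (out_ : String) (r : Option String) : String :=
  String.ofList (pvSub out_.toList)

-- ===== PRECONDITION & SPEC =====
def Spec_format_pip_output_py (out_ : String) (r : Option String) (out : String) : Prop := out = format_pip_output_py_alt out_ r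
instance (out_ : String) (r : Option String) (out : String) : Decidable (Spec_format_pip_output_py out_ r out) := by unfold Spec_format_pip_output_py; infer_instance

-- ===== CLAIM (what is proved, stated in full; the proofs are below) =====
def Claim_equal_format_pip_output_py : Prop := ∀ (out_ : String) (r : Option String), Dom_format_pip_output_py out_ r → Spec_format_pip_output_py out_ r (format_pip_output_py out_ r)

-- ===== LEMMAS AND PROOFS =====

-- reference single-char splitter (proof-side only)
def splitCh (s : Char) : List Char → List (List Char)
  | [] => [[]]
  | c :: rest =>
    if c = s then [] :: splitCh s rest
    else
      match splitCh s rest with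
      | [] => [[c]]
      | p :: ps => (c :: p) :: ps

theorem splitCh_ne_nil (s : Char) (l : List Char) : splitCh s l ≠ [] := by
  cases l with
  | nil => simp [splitCh]
  | cons c rest =>
    simp only [splitCh]
    split
    · simp
    · cases h : splitCh s rest <;> simp

theorem go_eq (s : Char) (l : List Char) : ∀ (fuel : Nat) (cur : List Char) (acc : List (List Char)),
    l.length ≤ fuel →
    PySem.Chars.splitOn.go [s] fuel l cur acc
      = acc.reverse ++ (splitCh s l).modifyHead (cur.reverse ++ ·) := by
  induction l with
  | nil =>
    intro fuel cur acc _
    cases fuel <;> simp [PySem.Chars.splitOn.go, splitCh]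
  | cons c rest ih =>
    intro fuel cur acc hf
    cases fuel with
    | zero => simp at hf
    | succ f =>
      simp only [PySem.Chars.splitOn.go]
      by_cases hc : s = c
      · have : [s].isPrefixOf (c :: rest) = true := by simp [List.isPrefixOf, hc]
        rw [if_pos this]
        have hdrop : List.drop [s].length (c :: rest) = rest := by simp
        rw [hdrop, ih f [] (cur.reverse :: acc) (by simpa using Nat.le_of_succ_le_succ hf)]
        subst hc
        simp only [splitCh]
        cases h : splitCh s rest with
        | nil => exact absurd h (splitCh_ne_nil s rest)
        | cons p ps => simp
      · have : [s].isPrefixOf (c :: rest) = false := by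
          simp only [List.isPrefixOf, Bool.and_eq_false_iff, beq_eq_false_iff_ne]
          exact Or.inl (fun h => hc h)
        rw [if_neg (by simp [this])]
        rw [ih f (c :: cur) acc (Nat.le_of_succ_le_succ hf)]
        cases h : splitCh s rest with
        | nil => exact absurd h (splitCh_ne_nil s rest)
        | cons p ps =>
          simp only [splitCh, h, if_neg (fun hcs => hc (Eq.symm hcs))]
          simp

theorem splitOn_eq_splitCh (s : Char) (l : List Char) :
    PySem.Chars.splitOn l [s] = splitCh s l := by
  rw [PySem.Chars.splitOn, go_eq s l (l.length + 1) [] [] (by omega)]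
  cases h : splitCh s l with
  | nil => exact absurd h (splitCh_ne_nil s l)
  | cons p ps => simp


theorem splitCh_no_sep {s : Char} {l : List Char} (h : s ∉ l) : splitCh s l = [l] := by
  induction l with
  | nil => rfl
  | cons c rest ih =>
    simp only [List.mem_cons, not_or] at h
    simp only [splitCh, if_neg (fun hc => h.1 (Eq.symm hc)), ih h.2]

theorem splitCh_append {s : Char} {l : List Char} (rest : List Char) (h : s ∉ l) :
    splitCh s (l ++ s :: rest) = l :: splitCh s rest := by
  induction l with
  | nil => simp [splitCh]
  | cons c l' ih =>
    simp only [List.mem_cons, not_or] at h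
    simp only [List.cons_append, splitCh, if_neg (fun hc => h.1 (Eq.symm hc)), ih h.2]

theorem splitCh_head_prefix {s : Char} : ∀ {cs p : List Char} {ps : List (List Char)},
    splitCh s cs = p :: ps → p <+: cs := by
  intro cs
  induction cs with
  | nil => intro p ps h; simp [splitCh] at h; simp [h.1]
  | cons c rest ih =>
    intro p ps h
    simp only [splitCh] at h
    split at h
    · simp at h
      exact h.1 ▸ List.nil_prefix
    · cases hq : splitCh s rest with
      | nil => exact absurd hq (splitCh_ne_nil s rest)
      | cons q qs =>
        rw [hq] at h
        cases h
        exact List.cons_prefix_cons.mpr ⟨rfl, ih hq⟩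

theorem prefix_takeWhile {p : Char → Bool} : ∀ {pat xs : List Char},
    pat <+: xs → (∀ a ∈ pat, p a = true) → pat <+: xs.takeWhile p := by
  intro pat
  induction pat with
  | nil => intro xs _ _; exact List.nil_prefix
  | cons a pat' ih =>
    intro xs h hall
    obtain ⟨t, ht⟩ := h
    subst ht
    have ha : p a = true := hall a (by simp)
    simp only [List.cons_append, List.takeWhile_cons, ha, if_pos]
    exact List.cons_prefix_cons.mpr ⟨rfl, ih (List.prefix_append _ _) (fun b hb => hall b (by simp [hb]))⟩

theorem genLine_of_prefix {l : List Char} (h : pvPat <+: l) : pvGenLine l = [] := by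
  have hin : PySem.Chars.isIn pvPat l = true := (PySem.Chars.isIn_iff_infix _ _).mpr h.isInfix
  have hnn : 0 ≤ PySem.Chars.find l pvPat := (PySem.Chars.find_nonneg_iff _ _).mpr h.isInfix
  have hspec := PySem.Chars.find_spec hnn
  have hz : (PySem.Chars.find l pvPat).toNat = 0 := by
    by_contra hne
    exact hspec.2 0 (Nat.pos_of_ne_zero hne) (by simpa using h)
  have hf : PySem.Chars.find l pvPat = 0 := by omega
  simp [pvGenLine, hin, hf, PySem.List.slice_to _ (le_refl (0 : Int))]

theorem genLine_cons {c : Char} {l : List Char} (h : ¬ pvPat <+: (c :: l)) :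
    pvGenLine (c :: l) = c :: pvGenLine l := by
  by_cases hin : pvPat <:+: l
  · have hin' : pvPat <:+: (c :: l) := List.infix_cons_iff.mpr (Or.inr hin)
    have hb : PySem.Chars.isIn pvPat l = true := (PySem.Chars.isIn_iff_infix _ _).mpr hin
    have hb' : PySem.Chars.isIn pvPat (c :: l) = true := (PySem.Chars.isIn_iff_infix _ _).mpr hin'
    have hj : 0 ≤ PySem.Chars.find l pvPat := (PySem.Chars.find_nonneg_iff _ _).mpr hin
    have hk : 0 ≤ PySem.Chars.find (c :: l) pvPat := (PySem.Chars.find_nonneg_iff _ _).mpr hin'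
    have hjs := PySem.Chars.find_spec hj
    have hks := PySem.Chars.find_spec hk
    -- find (c :: l) = find l + 1
    have hk0 : (PySem.Chars.find (c :: l) pvPat).toNat ≠ 0 := by
      intro h0
      exact h (by simpa [h0] using hks.1)
    have hle1 : (PySem.Chars.find (c :: l) pvPat).toNat ≤ (PySem.Chars.find l pvPat).toNat + 1 := by
      by_contra hgt
      exact hks.2 ((PySem.Chars.find l pvPat).toNat + 1) (by omega) (by simpa using hjs.1)
    have hle2 : (PySem.Chars.find l pvPat).toNat ≤ (PySem.Chars.find (c :: l) pvPat).toNat - 1 := by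
      by_contra hgt
      refine hjs.2 ((PySem.Chars.find (c :: l) pvPat).toNat - 1) (by omega) ?_
      have := hks.1
      rwa [show (PySem.Chars.find (c :: l) pvPat).toNat
            = (PySem.Chars.find (c :: l) pvPat).toNat - 1 + 1 by omega,
          List.drop_succ_cons] at this
    have hkeq : (PySem.Chars.find (c :: l) pvPat).toNat = (PySem.Chars.find l pvPat).toNat + 1 := by omega
    have hjv : PySem.Chars.find l pvPat = ((PySem.Chars.find l pvPat).toNat : Int) := by omega
    have hkv : PySem.Chars.find (c :: l) pvPat = ((PySem.Chars.find (c :: l) pvPat).toNat : Int) := by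
      omega
    simp only [pvGenLine, hb, hb', if_true, PySem.Chars.slice]
    rw [PySem.List.slice_to _ hj, PySem.List.slice_to _ hk, hkeq, List.take_succ_cons]
  · have hb : PySem.Chars.isIn pvPat l = false := by
      rw [PySem.Chars.isIn_eq_false_iff]; exact hin
    have hb' : PySem.Chars.isIn pvPat (c :: l) = false := by
      rw [PySem.Chars.isIn_eq_false_iff]
      intro hcl
      rcases List.infix_cons_iff.mp hcl with h1 | h2
      · exact h h1
      · exact hin h2
    simp [pvGenLine, hb, hb']

theorem pvPat_eq : pvPat = ['(', 'f', 'r', 'o', 'm', ' ', '-', 'r'] := rfl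

theorem pat_chars_ne_nl : ∀ a ∈ pvPat, (decide (a ≠ '\n')) = true := by
  rw [pvPat_eq]
  intro a ha
  fin_cases ha <;> decide

theorem pvGenLine_nil_eq : pvGenLine [] = [] := by
  have h : PySem.Chars.isIn pvPat [] = false := by
    rw [PySem.Chars.isIn_eq_false_iff]
    intro hin
    rw [List.infix_nil] at hin
    exact absurd (pvPat_eq ▸ hin) (by decide)
  simp [pvGenLine, h]

theorem main_aux : ∀ (n : Nat) (cs : List Char), cs.length ≤ n →
    pvSub cs = PySem.Chars.join ['\n'] ((splitCh '\n' cs).map pvGenLine) := by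
  intro n
  induction n with
  | zero =>
    intro cs hcs
    have hnil : cs = [] := List.eq_nil_of_length_eq_zero (Nat.le_zero.mp hcs)
    subst hnil
    rw [show splitCh '\n' ([] : List Char) = [[]] from rfl, List.map_singleton,
      pvGenLine_nil_eq, PySem.Chars.join_singleton]
    simp [pvSub]
  | succ m ih =>
    intro cs hcs
    cases cs with
    | nil =>
      rw [show splitCh '\n' ([] : List Char) = [[]] from rfl, List.map_singleton,
        pvGenLine_nil_eq, PySem.Chars.join_singleton]
      simp [pvSub]
    | cons c cs' =>
      simp only [List.length_cons, Nat.add_le_add_iff_right] at hcs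
      by_cases hm : pvPat.isPrefixOf (c :: cs') = true
      · -- the marker starts here: B skips to the newline, A empties this line
        have hpre : pvPat <+: (c :: cs') := List.isPrefixOf_iff_prefix.mp hm
        have hc : c = '(' := by
          obtain ⟨t, ht⟩ := hpre
          rw [pvPat_eq, List.cons_append] at ht
          injection ht with h1 _
          exact h1.symm
        have hcp : (decide (c ≠ '\n')) = true := by subst hc; decide
        have hsplit : List.takeWhile (fun x => decide (x ≠ '\n')) (c :: cs')
            ++ List.dropWhile (fun x => decide (x ≠ '\n')) (c :: cs') = c :: cs' :=
          List.takeWhile_append_dropWhile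
        set l := List.takeWhile (fun x => decide (x ≠ '\n')) (c :: cs') with hl
        set d := List.dropWhile (fun x => decide (x ≠ '\n')) (c :: cs') with hd
        have hnl : '\n' ∉ l := by
          intro hmem
          have := List.mem_takeWhile_imp (hl ▸ hmem)
          simp at this
        have hpl : pvPat <+: l := prefix_takeWhile hpre pat_chars_ne_nl
        have hdrop : List.dropWhile (fun x => decide (x ≠ '\n')) cs' = d := by
          rw [hd]
          exact (List.dropWhile_cons_of_pos (p := fun x => decide (x ≠ '\n')) (a := c)
            (l := cs') (by exact hcp)).symm
        rw [pvSub, if_pos hm, hdrop]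
        cases hdc : d with
        | nil =>
          have hcl : c :: cs' = l := by rw [← hsplit, hdc, List.append_nil]
          rw [hcl, splitCh_no_sep hnl, List.map_singleton, PySem.Chars.join_singleton,
            genLine_of_prefix hpl]
          simp [pvSub]
        | cons d0 d' =>
          have hd0 : d0 = '\n' := by
            have h1 : List.dropWhile (fun x => decide (x ≠ '\n')) (c :: cs') = d0 :: d' := by
              rw [← hd, hdc]
            have h2 := List.head_dropWhile_not (fun x => decide (x ≠ '\n')) (l := c :: cs')
              (by rw [h1]; simp)
            simp only [h1, List.head_cons] at h2
            simpa using h2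
          subst hd0
          have hcl : c :: cs' = l ++ '\n' :: d' := by rw [← hsplit, hdc]
          have hd'len : d'.length ≤ m := by
            have hlen : (c :: cs').length = l.length + (d'.length + 1) := by
              rw [hcl]; simp
            simp only [List.length_cons] at hlen
            have hl1 : 1 ≤ l.length := by
              rcases hpl with ⟨t, ht⟩
              rw [← ht, pvPat_eq]
              simp
            omega
          have hnpd : pvPat.isPrefixOf ('\n' :: d') = false := by
            rw [pvPat_eq]
            simp [List.isPrefixOf]
          rw [hcl, splitCh_append _ hnl, List.map_cons, genLine_of_prefix hpl]
          cases hsc : splitCh '\n' d' with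
          | nil => exact absurd hsc (splitCh_ne_nil _ _)
          | cons q qs =>
            have ihx : pvSub d' = PySem.Chars.join ['\n'] (List.map pvGenLine (q :: qs)) := by
              rw [ih d' hd'len, hsc]
            rw [List.map_cons, PySem.Chars.join_cons_cons, ← List.map_cons, ← ihx,
              pvSub, if_neg (by simp [hnpd])]
            simp
      · have hnp : ¬ pvPat <+: (c :: cs') := fun h => hm (List.isPrefixOf_iff_prefix.mpr h)
        rw [pvSub, if_neg hm]
        by_cases hcn : c = '\n'
        · subst hcn
          rw [show splitCh '\n' ('\n' :: cs') = [] :: splitCh '\n' cs' by simp [splitCh]]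
          cases hsc : splitCh '\n' cs' with
          | nil => exact absurd hsc (splitCh_ne_nil _ _)
          | cons q qs =>
            have ihx : pvSub cs' = PySem.Chars.join ['\n'] (List.map pvGenLine (q :: qs)) := by
              rw [ih cs' hcs, hsc]
            rw [List.map_cons, List.map_cons, PySem.Chars.join_cons_cons, pvGenLine_nil_eq,
              ← List.map_cons, ← ihx]
            simp
        · cases hsc : splitCh '\n' cs' with
          | nil => exact absurd hsc (splitCh_ne_nil _ _)
          | cons q qs =>
            have hscc : splitCh '\n' (c :: cs') = (c :: q) :: qs := by
              simp only [splitCh, if_neg hcn, hsc]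
            have hqp : ¬ pvPat <+: (c :: q) := by
              intro hp
              exact hnp (hp.trans (List.cons_prefix_cons.mpr ⟨rfl, splitCh_head_prefix hsc⟩))
            rw [hscc, List.map_cons, genLine_cons hqp]
            cases qs with
            | nil =>
              rw [List.map_nil, PySem.Chars.join_singleton, ih cs' hcs, hsc,
                List.map_singleton, PySem.Chars.join_singleton]
            | cons q2 qs2 =>
              rw [List.map_cons, PySem.Chars.join_cons_cons, ih cs' hcs, hsc, List.map_cons,
                List.map_cons, PySem.Chars.join_cons_cons]
              simp

theorem main_lemma : ∀ cs : List Char,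
    pvSub cs = PySem.Chars.join ['\n'] ((splitCh '\n' cs).map pvGenLine) :=
  fun cs => main_aux cs.length cs (le_refl _)

-- ===== VERDICT (by name: the statement is the Claim_ definition above) =====
theorem format_pip_output_py_spec : Claim_equal_format_pip_output_py := by
  intro out_ r _
  unfold Spec_format_pip_output_py format_pip_output_py format_pip_output_py_alt
  rw [splitOn_eq_splitCh, main_lemma]
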